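-- pv_equiv track=rewrite | github.com/kjiyun/Algorithm-Study | Programmers/롤케이크 자르기.py | solution
-- ===== SOURCE A (Python) =====
-- from collections import Counter
--
-- def solution(topping):
--     answer = 0
--     right_dict = Counter(topping)
--
--     left_dict = {}
--
--     for i in topping:
--
--         if i in left_dict:
--             left_dict[i] += 1
--         else:
--             left_dict[i] = 1
--         right_dict[i] -= 1
--
--         if right_dict[i] == 0:
--             right_dict.pop(i)
--
--         if len(left_dict) == len(right_dict):
--             answer += 1
--     return answer
-- ===== SOURCE B (Python) =====
-- def solution(topping):
--     # suffix[j] = number of distinct toppings in topping[j:] (built right-to-left)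
--     suffix = [0]
--     seen = set()
--     for t in reversed(topping):
--         seen.add(t)
--         suffix.append(len(seen))
--     suffix.reverse()
--     left = set()
--     answer = 0
--     for t, right_count in zip(topping, suffix[1:]):
--         left.add(t)
--         if len(left) == right_count:
--             answer += 1
--     return answer
-- ===== Notes on version B (the rewrite author's own statement) =====
-- stated objective: alternative
-- what changed: Replaced A's simultaneous two-dict single pass (left counter plus decremented right Counter with pops) by a precomputed right-to-left suffix-distinct table built with a set, followed by a forward pass that maintains only a left set and compares its size with the table entry.
import Mathlib
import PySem

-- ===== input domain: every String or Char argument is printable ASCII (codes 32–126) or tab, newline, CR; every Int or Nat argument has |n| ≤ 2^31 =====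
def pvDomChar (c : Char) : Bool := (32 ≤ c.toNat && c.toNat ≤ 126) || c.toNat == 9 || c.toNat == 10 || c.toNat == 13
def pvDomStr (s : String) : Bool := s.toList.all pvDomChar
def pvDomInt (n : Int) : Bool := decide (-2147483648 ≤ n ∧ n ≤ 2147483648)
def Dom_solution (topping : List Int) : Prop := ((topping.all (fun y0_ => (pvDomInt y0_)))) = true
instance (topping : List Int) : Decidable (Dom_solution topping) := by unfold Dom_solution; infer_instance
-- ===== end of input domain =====

-- B replaces A's simultaneous two-dict single pass by a precomputed right-to-left
-- suffix-distinct table plus a separate forward pass with a left set (alternative decomposition).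


-- ===== PORT A =====
def solution (topping : List Int) : Int :=
  (topping.foldl
    (fun (st : Int × PySem.Dict Int Int × PySem.Dict Int Int) i =>
      let left_dict := if st.2.1.contains i then st.2.1.insert i (st.2.1.getD i 0 + 1)
                       else st.2.1.insert i 1
      let right_dict := st.2.2.insert i (st.2.2.getD i 0 - 1)
      let right_dict := if right_dict.getD i 0 == 0 then right_dict.erase i else right_dict
      let answer := if left_dict.size == right_dict.size then st.1 + 1 else st.1
      (answer, left_dict, right_dict))
    (0, PySem.Dict.empty, PySem.Dict.counter topping)).1

-- ===== PORT B =====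
def solution_alt (topping : List Int) : Int :=
  -- first pass: walk reversed topping, recording len(seen) after each add; then reverse the table
  let p1 := topping.reverse.foldl
    (fun (st : List Int × PySem.Set Int) t =>
      let seen := PySem.Set.add st.2 t
      (st.1 ++ [(seen.length : Int)], seen))
    ([0], PySem.Set.empty)
  let suffix := p1.1.reverse
  -- second pass: left set; compare its size with suffix[j+1] (zip topping with suffix[1:])
  ((topping.zip (suffix.drop 1)).foldl
    (fun (st : Int × PySem.Set Int) p =>
      let left := PySem.Set.add st.2 p.1
      (if (left.length : Int) = p.2 then st.1 + 1 else st.1, left))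
    (0, PySem.Set.empty)).1

-- ===== PRECONDITION & SPEC =====
def Spec_solution (topping : List Int) (out : Int) : Prop := out = solution_alt topping
instance (topping : List Int) (out : Int) : Decidable (Spec_solution topping out) := by unfold Spec_solution; infer_instance

-- ===== CLAIM (what is proved, stated in full; the proofs are below) =====
def Claim_equal_solution : Prop := ∀ (topping : List Int), Dom_solution topping → Spec_solution topping (solution topping)

-- ===== LEMMAS AND PROOFS =====

/-- number of valid cuts, counted recursively while moving elements from suffix to prefix -/
def goodCount (p s : List Int) : Int :=
  match s with
  | [] => 0
  | i :: s' => (if (p ++ [i]).toFinset.card = s'.toFinset.card then 1 else 0) + goodCount (p ++ [i]) s'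

/-- a PySem set built from a list has as many elements as the list has distinct values -/
theorem setlen (l : List Int) : (PySem.Set.ofList l).length = l.toFinset.card := by
  have hperm : (PySem.Set.ofList l).Perm l.dedup := by
    rw [List.perm_ext_iff_of_nodup (PySem.Set.nodup_ofList l) l.nodup_dedup]
    intro a; simp [PySem.Set.mem_ofList]
  rw [hperm.length_eq, List.card_toFinset]

theorem ofList_append_singleton (p : List Int) (i : Int) :
    PySem.Set.ofList (p ++ [i]) = PySem.Set.add (PySem.Set.ofList p) i := by
  simp [PySem.Set.ofList_eq_foldl, List.foldl_append]

-- ---------- side B ----------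

theorem pass1_snd (r : List Int) (a : List Int) (s0 : PySem.Set Int) :
    (r.foldl
      (fun (st : List Int × PySem.Set Int) t =>
        let seen := PySem.Set.add st.2 t
        (st.1 ++ [(seen.length : Int)], seen)) (a, s0)).1 =
    a ++ (List.range r.length).map
      (fun k => ((PySem.Set.update s0 (r.take (k + 1))).length : Int)) := by
  induction r generalizing a s0 with
  | nil => simp
  | cons t r ih =>
    simp only [List.foldl_cons, ih, List.length_cons, List.range_succ_eq_map, List.map_cons,
      List.map_map]
    simp [PySem.Set.update, List.append_assoc]

theorem update_empty (l : List Int) : PySem.Set.update PySem.Set.empty l = PySem.Set.ofList l := by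
  simp [PySem.Set.update, PySem.Set.ofList_eq_foldl, PySem.Set.empty]

/-- the reversed first-pass table lists the distinct counts of all suffixes -/
theorem suffix_table (l : List Int) :
    (([0] ++ (List.range l.reverse.length).map
        (fun k => ((PySem.Set.update PySem.Set.empty (l.reverse.take (k + 1))).length : Int))).reverse) =
    (List.range (l.length + 1)).map (fun j => ((l.drop j).toFinset.card : Int)) := by
  rw [List.reverse_append, ← List.map_reverse, List.range_succ, List.map_append]
  simp only [List.length_reverse]
  congr 1
  · rw [List.range_eq_range', List.reverse_range', ← List.range_eq_range', List.map_map]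
    apply List.map_congr_left
    intro k hk
    rw [List.mem_range] at hk
    simp only [Function.comp_def, update_empty, setlen, List.take_reverse]
    have h2 : l.length - (0 + l.length - 1 - k + 1) = k := by omega
    rw [h2, List.toFinset_reverse]
  · simp

theorem pass2 (s : List Int) (p : List Int) (a : Int) :
    ((s.zip ((List.range s.length).map
        (fun k => ((s.drop (k + 1)).toFinset.card : Int)))).foldl
      (fun (st : Int × PySem.Set Int) q =>
        let left := PySem.Set.add st.2 q.1
        (if (left.length : Int) = q.2 then st.1 + 1 else st.1, left))
      (a, PySem.Set.ofList p)).1 = a + goodCount p s := by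
  induction s generalizing p a with
  | nil => simp [goodCount]
  | cons i s ih =>
    rw [List.length_cons, List.range_succ_eq_map, List.map_cons, List.map_map]
    simp only [List.zip_cons_cons, List.foldl_cons, List.drop_succ_cons, List.drop_zero]
    simp only [Function.comp_def]
    rw [← ofList_append_singleton]
    simp only [setlen, Nat.cast_inj, goodCount]
    by_cases h : (p ++ [i]).toFinset.card = s.toFinset.card
    · simp only [h, if_true, ih]; ring
    · simp only [h, if_false, ih]; ring

theorem alt_eq_goodCount (topping : List Int) : solution_alt topping = goodCount [] topping := by
  unfold solution_alt
  simp only [pass1_snd, suffix_table, List.range_succ_eq_map, List.map_cons, List.drop_succ_cons,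
    List.drop_zero, List.map_map, Function.comp_def, Nat.succ_eq_add_one]
  have h : (PySem.Set.empty : PySem.Set Int) = PySem.Set.ofList [] := rfl
  rw [h, pass2 topping [] 0]
  simp

-- ---------- side A ----------

/-- canonical value of A's right dict when the remaining suffix is `s` -/
def rcanon (tot s : List Int) : PySem.Dict Int Int :=
  PySem.Dict.mk
    (((PySem.Set.ofList tot).filter (fun k => s.count k != 0)).map
      (fun k => (k, (s.count k : Int))))

theorem rcanon_keys (tot s : List Int) :
    (rcanon tot s).keys = (PySem.Set.ofList tot).filter (fun k => s.count k != 0) := by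
  simp [rcanon, PySem.Dict.keys, List.map_map, Function.comp_def]

theorem rcanon_keys_nodup (tot s : List Int) : (rcanon tot s).keys.Nodup := by
  rw [rcanon_keys]; exact (PySem.Set.nodup_ofList tot).filter _

theorem rcanon_getD (tot s : List Int) (k : Int) (hk : k ∈ tot) (hc : s.count k ≠ 0) :
    (rcanon tot s).getD k 0 = (s.count k : Int) := by
  apply PySem.Dict.getD_of_mem_items _ _ (rcanon_keys_nodup tot s)
  simp [rcanon, List.mem_filter, PySem.Set.mem_ofList]
  exact ⟨hk, hc⟩

theorem rcanon_contains (tot s : List Int) (k : Int) (hk : k ∈ tot) (hc : s.count k ≠ 0) :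
    (rcanon tot s).contains k = true := by
  rw [PySem.Dict.contains_eq_decide_mem_keys, rcanon_keys]
  simp [List.mem_filter, PySem.Set.mem_ofList]
  exact ⟨hk, hc⟩

/-- the size of the canonical right dict is the number of distinct values in the suffix -/
theorem rcanon_size (tot s : List Int) (hsub : ∀ x ∈ s, x ∈ tot) :
    (rcanon tot s).size = s.toFinset.card := by
  have hnd : ((PySem.Set.ofList tot).filter (fun k => s.count k != 0)).Nodup :=
    (PySem.Set.nodup_ofList tot).filter _
  have hperm : ((PySem.Set.ofList tot).filter (fun k => s.count k != 0)).Perm s.dedup := by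
    rw [List.perm_ext_iff_of_nodup hnd s.nodup_dedup]
    intro a
    simp only [List.mem_filter, PySem.Set.mem_ofList, List.mem_dedup, bne_iff_ne, ne_eq,
      List.count_eq_zero]
    constructor
    · rintro ⟨-, h⟩; simpa using h
    · intro h; exact ⟨hsub a h, by simpa using h⟩
  simp only [rcanon, PySem.Dict.size, List.length_map]
  rw [hperm.length_eq, List.card_toFinset]

theorem rcanon_init (l : List Int) : rcanon l l = PySem.Dict.counter l := by
  apply PySem.Dict.ext
  rw [PySem.Dict.items_counter]
  simp only [rcanon]
  congr 1
  apply List.filter_eq_self.mpr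
  intro k hk
  simp only [bne_iff_ne, ne_eq, List.count_eq_zero]
  intro hcontra
  exact hcontra ((PySem.Set.mem_ofList l k).mp hk)

theorem map_filter_congr {α β : Type} (L : List α) (F G : α → β) (P Q : α → Bool)
    (hP : ∀ x ∈ L, P x = Q x) (hF : ∀ x ∈ L, Q x = true → F x = G x) :
    (L.filter P).map F = (L.filter Q).map G := by
  rw [List.filter_congr hP]
  exact List.map_congr_left
    (fun a ha => hF a (List.mem_filter.mp ha).1 (List.mem_filter.mp ha).2)

/-- one step of A's loop sends the canonical right dict for `i :: s` to the one for `s` -/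
theorem rcanon_step (tot : List Int) (i : Int) (s : List Int) (hi : i ∈ tot) :
    (let right_dict := (rcanon tot (i :: s)).insert i ((rcanon tot (i :: s)).getD i 0 - 1)
     if right_dict.getD i 0 == 0 then right_dict.erase i else right_dict) = rcanon tot s := by
  have hcnt : (i :: s).count i ≠ 0 := by simp
  have hget : (rcanon tot (i :: s)).getD i 0 = ((i :: s).count i : Int) := rcanon_getD tot _ i hi hcnt
  have hcont : (rcanon tot (i :: s)).contains i = true := rcanon_contains tot _ i hi hcnt
  have hval : ((i :: s).count i : Int) - 1 = (s.count i : Int) := by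
    rw [List.count_cons_self]; push_cast; ring
  simp only [hget, hval]
  have hins : ((rcanon tot (i :: s)).insert i ((s.count i : Int))).getD i 0 = (s.count i : Int) :=
    PySem.Dict.getD_insert_self _ _ _ _
  simp only [hins]
  by_cases h0 : s.count i = 0
  · -- the count hits zero: the key is popped, matching the filter losing i
    simp only [h0, Nat.cast_zero]
    simp only [beq_self_eq_true, if_true]
    apply PySem.Dict.ext
    simp only [PySem.Dict.erase, PySem.Dict.items_insert_of_contains _ _ hcont]
    simp only [rcanon, List.map_map, List.filter_map]
    rw [List.filter_filter]
    apply map_filter_congr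
    · intro x _
      by_cases hk : x = i
      · subst hk; simp [h0]
      · have hix : ¬ i = x := fun h => hk h.symm
        simp [List.count_cons, hk, hix]
    · intro x _ hx
      have hxi : ¬ x = i := by
        intro h; subst h; simp [h0] at hx
      have hix : ¬ i = x := fun h => hxi h.symm
      simp [List.count_cons, hxi, hix]
  · have hne : (((s.count i : Int)) == 0) = false := by
      simp only [beq_eq_false_iff_ne, ne_eq, Nat.cast_eq_zero]; exact h0
    simp only [hne, if_neg, Bool.false_eq_true, not_false_eq_true]
    apply PySem.Dict.ext
    simp only [PySem.Dict.items_insert_of_contains _ _ hcont]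
    simp only [rcanon, List.map_map]
    apply map_filter_congr
    · intro x _
      by_cases hk : x = i
      · subst hk
        simp [List.count_cons_self, h0]
      · have hix : ¬ i = x := fun h => hk h.symm
        simp [hix]
    · intro x _ hx
      by_cases hk : x = i
      · subst hk
        simp
      · have hix : ¬ i = x := fun h => hk h.symm
        simp [List.count_cons, hk, hix]

theorem counter_step (p : List Int) (i : Int) :
    (if (PySem.Dict.counter p).contains i
     then (PySem.Dict.counter p).insert i ((PySem.Dict.counter p).getD i 0 + 1)
     else (PySem.Dict.counter p).insert i 1) = PySem.Dict.counter (p ++ [i]) := by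
  rw [PySem.Dict.counter_append_singleton, PySem.Dict.modify]
  by_cases hc : (PySem.Dict.counter p).contains i = true
  · simp [hc]
  · rw [if_neg hc, PySem.Dict.getD_of_not_contains _ _ (by simpa using hc)]
    norm_num

theorem counter_size (p : List Int) : (PySem.Dict.counter p).size = p.toFinset.card := by
  have h : (PySem.Dict.counter p).size = (PySem.Dict.counter p).keys.length := by
    simp [PySem.Dict.size, PySem.Dict.keys]
  rw [h, PySem.Dict.keys_counter]
  exact setlen p

theorem a_loop (s : List Int) (tot p : List Int) (ans : Int) (htot : tot = p ++ s) :
    (s.foldl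
      (fun (st : Int × PySem.Dict Int Int × PySem.Dict Int Int) i =>
        let left_dict := if st.2.1.contains i then st.2.1.insert i (st.2.1.getD i 0 + 1)
                         else st.2.1.insert i 1
        let right_dict := st.2.2.insert i (st.2.2.getD i 0 - 1)
        let right_dict := if right_dict.getD i 0 == 0 then right_dict.erase i else right_dict
        let answer := if left_dict.size == right_dict.size then st.1 + 1 else st.1
        (answer, left_dict, right_dict))
      (ans, PySem.Dict.counter p, rcanon tot s)).1 = ans + goodCount p s := by
  induction s generalizing p ans with
  | nil => simp [goodCount]
  | cons i s ih =>
    rw [List.foldl_cons]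
    simp only [counter_step, rcanon_step tot i s (by rw [htot]; simp)]
    rw [ih (p ++ [i]) _ (by rw [htot]; simp)]
    rw [counter_size, rcanon_size tot s (by intro x hx; rw [htot]; simp [hx])]
    simp only [goodCount, beq_iff_eq]
    by_cases h : (p ++ [i]).toFinset.card = s.toFinset.card
    · rw [if_pos h, if_pos h]; ring
    · rw [if_neg h, if_neg h]; ring

theorem a_eq_goodCount (topping : List Int) : solution topping = goodCount [] topping := by
  unfold solution
  have h1 : (PySem.Dict.empty : PySem.Dict Int Int) = PySem.Dict.counter [] := rfl
  rw [h1, ← rcanon_init topping]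
  rw [a_loop topping topping [] 0 rfl]
  ring

-- ===== VERDICT (by name: the statement is the Claim_ definition above) =====
theorem solution_spec : Claim_equal_solution := by
  intro topping _
  unfold Spec_solution
  rw [a_eq_goodCount, alt_eq_goodCount]
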